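-- pv_equiv track=rewrite | github.com/ms-jpq/nvim_rc | python/operators/comment.py | _p_indent
-- ===== SOURCE A (Python) =====
-- from typing import Iterable, Iterator, Optional, Sequence, Tuple
--
-- def _p_indent(line: str) -> str:
--     def cont() -> Iterator[str]:
--         for c in line:
--             if c.isspace():
--                 yield c
--             else:
--                 break
--
--     spaces = "".join(cont())
--     return spaces
-- ===== SOURCE B (Python) =====
-- def _p_indent(line: str) -> str:
--     stripped = line.lstrip()
--     return line[: len(line) - len(stripped)]
-- ===== Notes on version B (the rewrite author's own statement) =====
-- stated objective: idiomatic
-- what changed: Replaces the generator loop that accumulates whitespace characters until the first non-space with measure-then-slice: lstrip the line and slice off the prefix whose length is the difference of lengths.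
import Mathlib
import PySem

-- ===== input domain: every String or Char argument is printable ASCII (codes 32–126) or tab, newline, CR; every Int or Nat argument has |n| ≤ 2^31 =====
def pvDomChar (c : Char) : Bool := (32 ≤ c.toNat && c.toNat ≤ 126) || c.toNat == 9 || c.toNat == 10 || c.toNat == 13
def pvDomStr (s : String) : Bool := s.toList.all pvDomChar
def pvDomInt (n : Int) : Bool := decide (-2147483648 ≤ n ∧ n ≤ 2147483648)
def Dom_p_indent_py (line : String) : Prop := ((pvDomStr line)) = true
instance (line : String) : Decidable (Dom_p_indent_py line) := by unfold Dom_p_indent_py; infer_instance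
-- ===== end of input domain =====

-- B replaces A's accumulate-until-non-space generator loop with idiomatic measure-then-slice via lstrip; same O(n) cost.

-- ===== PORT A =====
-- the generator: yield each leading char while it isspace, stop at the first that is not
def pvContA : List Char → List Char
  | [] => []
  | c :: rest => if PySem.Chars.isspace c then c :: pvContA rest else []

def p_indent_py (line : String) : String :=
  String.ofList (pvContA line.toList)

-- ===== PORT B =====
def p_indent_py_alt (line : String) : String :=
  let stripped := PySem.Str.lstrip line
  String.ofList (PySem.List.slice line.toList none
    (some ((PySem.Str.len line) - (PySem.Str.len stripped))))

-- ===== PRECONDITION & SPEC =====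
def Spec_p_indent_py (line : String) (out : String) : Prop := out = p_indent_py_alt line
instance (line : String) (out : String) : Decidable (Spec_p_indent_py line out) := by unfold Spec_p_indent_py; infer_instance

-- ===== CLAIM (what is proved, stated in full; the proofs are below) =====
def Claim_equal_p_indent_py : Prop := ∀ (line : String), Dom_p_indent_py line → Spec_p_indent_py line (p_indent_py line)

-- ===== LEMMAS AND PROOFS =====
theorem pvContA_eq_takeWhile (cs : List Char) :
    pvContA cs = cs.takeWhile PySem.Chars.isspace := by
  induction cs with
  | nil => rfl
  | cons c rest ih => simp [pvContA, List.takeWhile, ih]; split <;> simp_all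

theorem take_sub_dropWhile (p : Char → Bool) (cs : List Char) :
    cs.take (cs.length - (cs.dropWhile p).length) = cs.takeWhile p := by
  have hsplit := List.takeWhile_append_dropWhile (p := p) (l := cs)
  have hlens : (cs.takeWhile p).length + (cs.dropWhile p).length = cs.length := by
    rw [← List.length_append, hsplit]
  have hk : cs.length - (cs.dropWhile p).length = (cs.takeWhile p).length := by omega
  have h1 : (cs.takeWhile p ++ cs.dropWhile p).take (cs.takeWhile p).length
      = cs.takeWhile p := List.take_left
  rw [hsplit] at h1
  rw [hk]; exact h1

-- ===== VERDICT (by name: the statement is the Claim_ definition above) =====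
theorem p_indent_py_spec : Claim_equal_p_indent_py := by
  intro line _
  unfold Spec_p_indent_py p_indent_py p_indent_py_alt
  have hl : PySem.Str.lstrip line =
      String.ofList (line.toList.dropWhile PySem.Chars.isspace) := rfl
  have hlen : ∀ s : String, PySem.Str.len s = (s.toList.length : Int) := by
    intro s; rfl
  simp only [hl, hlen, String.toList_ofList]
  have hle : (line.toList.dropWhile PySem.Chars.isspace).length ≤ line.toList.length :=
    List.length_dropWhile_le _ _
  have hc : ((line.toList.length : Int) - ((line.toList.dropWhile PySem.Chars.isspace).length : Int))
      = ((line.toList.length - (line.toList.dropWhile PySem.Chars.isspace).length : Nat) : Int) := by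
    omega
  rw [hc, PySem.List.slice_to_natCast, pvContA_eq_takeWhile, take_sub_dropWhile]
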